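-- pv_equiv track=rewrite | github.com/angelwhipple/6.101-Programming-Fundamentals | minelab.py | valid_coords
-- ===== SOURCE A (Python) =====
-- def valid_coords(dimen):
--     """
--     Returns all valid coordinates in a board of the given dimensions
--
--     """
--
--     if len(dimen) == 1:
--         for i in range(dimen[0]):
--             yield (i,)
--     else:
--         for n in valid_coords(dimen[1:]):
--             for i in range(dimen[0]):
--                 yield (i,)+n
-- ===== SOURCE B (Python) =====
-- def valid_coords(dimen):
--     coords = [()]
--     for d in reversed(dimen):
--         coords = [(i,) + c for c in coords for i in range(d)]
--     yield from coords
-- ===== Notes on version B (the rewrite author's own statement) =====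
-- stated objective: simpler
-- what changed: Replaces A's tail recursion on the dimension suffix by an iterative fold over the reversed dimensions that builds the coordinate list front-coordinate-fastest.
import Mathlib
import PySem

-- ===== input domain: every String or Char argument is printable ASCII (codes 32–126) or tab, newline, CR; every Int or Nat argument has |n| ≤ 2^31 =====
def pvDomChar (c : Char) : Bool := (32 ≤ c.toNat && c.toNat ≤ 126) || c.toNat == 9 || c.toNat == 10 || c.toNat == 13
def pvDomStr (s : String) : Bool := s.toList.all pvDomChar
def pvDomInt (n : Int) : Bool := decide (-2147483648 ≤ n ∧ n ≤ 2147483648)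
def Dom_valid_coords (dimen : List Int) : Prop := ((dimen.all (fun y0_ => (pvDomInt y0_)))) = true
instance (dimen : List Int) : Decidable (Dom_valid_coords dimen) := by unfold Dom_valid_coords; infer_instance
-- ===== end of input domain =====

-- B replaces A's tail recursion by an iterative fold over the reversed dimensions that
-- builds the full coordinate list (simpler decomposition; same asymptotic cost).
-- A is a generator; equivalence is about the list of yielded tuples.

-- ===== PORT A =====
-- A: if len(dimen)==1 yield (i,) for i in range(dimen[0]); else nest over the recursion on dimen[1:].
def valid_coords (dimen : List Int) : List (List Int) :=
  match dimen with
  | [] => []   -- Python A recurses forever (RecursionError) on []; excluded by Pre_valid_coords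
  | [d] => (PySem.List.pyRange 0 d 1).map (fun i => [i])
  | d :: e :: es =>
      (valid_coords (e :: es)).flatMap
        (fun n => (PySem.List.pyRange 0 d 1).map (fun i => i :: n))

-- ===== PORT B =====
-- B: coords = [()]; for d in reversed(dimen): coords = [(i,)+c for c in coords for i in range(d)]
def valid_coords_alt (dimen : List Int) : List (List Int) :=
  dimen.reverse.foldl
    (fun coords d => coords.flatMap (fun c => (PySem.List.pyRange 0 d 1).map (fun i => i :: c)))
    [[]]

-- ===== PRECONDITION & SPEC =====
-- Pre_ excludes only the empty list, on which the Python A raises RecursionError.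
def Pre_valid_coords (dimen : List Int) : Prop := dimen ≠ []
instance (dimen : List Int) : Decidable (Pre_valid_coords dimen) := by unfold Pre_valid_coords; infer_instance
def pvWitness_valid_coords : List Int := ([2, 3] : List Int)

def Spec_valid_coords (dimen : List Int) (out : List (List Int)) : Prop := out = valid_coords_alt dimen
instance (dimen : List Int) (out : List (List Int)) : Decidable (Spec_valid_coords dimen out) := by unfold Spec_valid_coords; infer_instance

-- ===== CLAIM (what is proved, stated in full; the proofs are below) =====
def Claim_equal_valid_coords : Prop := ∀ (dimen : List Int), Dom_valid_coords dimen → Pre_valid_coords dimen → Spec_valid_coords dimen (valid_coords dimen)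

-- ===== LEMMAS AND PROOFS =====

-- Peeling the head dimension off B's fold (reverse turns it into the last fold step).
theorem alt_cons (d : Int) (rest : List Int) :
    valid_coords_alt (d :: rest) =
      (valid_coords_alt rest).flatMap
        (fun c => (PySem.List.pyRange 0 d 1).map (fun i => i :: c)) := by
  simp [valid_coords_alt, List.reverse_cons, List.foldl_append]

theorem vc_eq (dimen : List Int) (h : dimen ≠ []) :
    valid_coords dimen = valid_coords_alt dimen := by
  induction dimen with
  | nil => exact absurd rfl h
  | cons d rest ih =>
    cases rest with
    | nil => simp [valid_coords, valid_coords_alt]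
    | cons e es =>
      rw [show valid_coords (d :: e :: es) =
            (valid_coords (e :: es)).flatMap
              (fun n => (PySem.List.pyRange 0 d 1).map (fun i => i :: n)) from rfl,
          alt_cons, ih (by simp)]

-- ===== VERDICT (by name: the statement is the Claim_ definition above) =====
theorem valid_coords_spec : Claim_equal_valid_coords := by
  intro dimen _ hpre
  unfold Spec_valid_coords
  exact vc_eq dimen hpre
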